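-- pv_equiv track=rewrite | github.com/IMAbril/ExactasPrograma | Clase 3/clase3.py | propagacion
-- ===== SOURCE A (Python) =====
-- def propagacion(bosque):
--     for i in range(0,len(bosque)):
--         for i in range(0, len(bosque)):
--             if bosque[i]==-1:
--                 if (i-1>=0) and bosque[i-1]==1:
--                     bosque[i-1]=-1
--                 if (i+1<len(bosque)) and bosque[i+1]==1:
--                     bosque[i+1]=-1
--     return bosque
-- ===== SOURCE B (Python) =====
-- def propagacion(bosque):
--     # Single pass over maximal runs of flammable cells (1/-1): if a run contains
--     # fire (-1), the whole run burns. Returns a new list (A mutates in place).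
--     out = []
--     run = []
--     burning = False
--     for x in bosque:
--         if x == 1 or x == -1:
--             run.append(x)
--             if x == -1:
--                 burning = True
--         else:
--             out += [-1] * len(run) if burning else run
--             out.append(x)
--             run = []
--             burning = False
--     out += [-1] * len(run) if burning else run
--     return out
-- ===== Notes on version B (the rewrite author's own statement) =====
-- stated objective: faster
-- what changed: A repeats a full left-to-right spreading pass over the whole list n times (a nested loop over indices with in-place neighbour updates); B makes one single pass that groups the list into maximal runs of flammable cells (1/-1) and replaces a whole run by -1s exactly when it contains a -1.
import Mathlib
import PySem

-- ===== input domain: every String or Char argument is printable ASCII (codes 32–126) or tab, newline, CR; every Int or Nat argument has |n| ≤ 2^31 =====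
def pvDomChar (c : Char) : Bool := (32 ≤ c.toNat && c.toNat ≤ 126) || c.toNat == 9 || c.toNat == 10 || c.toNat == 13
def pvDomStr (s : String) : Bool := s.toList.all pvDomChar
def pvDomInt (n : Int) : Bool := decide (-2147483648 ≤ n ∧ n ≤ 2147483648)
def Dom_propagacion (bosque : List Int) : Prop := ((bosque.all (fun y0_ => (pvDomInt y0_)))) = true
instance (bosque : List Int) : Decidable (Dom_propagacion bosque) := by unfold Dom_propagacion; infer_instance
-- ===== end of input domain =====

-- B replaces A's n dependent whole-array passes by one pass over maximal runs of
-- flammable cells (1/-1): a run containing a -1 burns entirely.  A mutates its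
-- argument in place and returns it; B returns a fresh list — the equivalence
-- proved here is about the RETURN value only.

-- ===== PORT A =====
-- one iteration of the inner loop body at index i (bosque[i]==-1 spreads to both neighbours)
def pvStepA (b : List Int) (i : Nat) : List Int :=
  if b.getD i 0 = -1 then
    let b1 := if 1 ≤ i ∧ b.getD (i - 1) 0 = 1 then b.set (i - 1) (-1) else b
    if i + 1 < b1.length ∧ b1.getD (i + 1) 0 = 1 then b1.set (i + 1) (-1) else b1
  else b

def propagacion (bosque : List Int) : List Int :=
  (List.range bosque.length).foldl
    (fun b _ => (List.range b.length).foldl pvStepA b) bosque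

-- ===== PORT B =====
def pvFlush (run : List Int) (burning : Bool) : List Int :=
  if burning then List.replicate run.length (-1) else run

def pvStepB (s : List Int × List Int × Bool) (x : Int) : List Int × List Int × Bool :=
  if x = 1 ∨ x = -1 then
    (s.1, s.2.1 ++ [x], if x = -1 then true else s.2.2)
  else
    (s.1 ++ pvFlush s.2.1 s.2.2 ++ [x], [], false)

def propagacion_alt (bosque : List Int) : List Int :=
  let st := bosque.foldl pvStepB ([], [], false)
  st.1 ++ pvFlush st.2.1 st.2.2

-- ===== PRECONDITION & SPEC =====
def Spec_propagacion (bosque : List Int) (out : List Int) : Prop := out = propagacion_alt bosque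
instance (bosque : List Int) (out : List Int) : Decidable (Spec_propagacion bosque out) := by unfold Spec_propagacion; infer_instance

-- ===== CLAIM (what is proved, stated in full; the proofs are below) =====
def Claim_equal_propagacion : Prop := ∀ (bosque : List Int), Dom_propagacion bosque → Spec_propagacion bosque (propagacion bosque)

-- ===== LEMMAS AND PROOFS =====

-- one whole inner pass of A
def pvPass (b : List Int) : List Int := (List.range b.length).foldl pvStepA b

-- structural form of one pass: pvG prev cur rest scans with prev = value at i-1
-- (still awaiting a possible back-update from i) and cur = value at i (already
-- forward-updated by i-1).
def pvG : Int → Int → List Int → List Int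
  | prev, cur, [] => [if cur = -1 ∧ prev = 1 then -1 else prev, cur]
  | prev, cur, x :: rest =>
      (if cur = -1 ∧ prev = 1 then -1 else prev) ::
        pvG cur (if cur = -1 ∧ x = 1 then -1 else x) rest

def pvPassS : List Int → List Int
  | [] => []
  | [x] => [x]
  | x :: y :: rest => pvG x (if x = -1 ∧ y = 1 then -1 else y) rest

lemma pvPassS_nil : pvPassS [] = [] := rfl
lemma pvPassS_one (x : Int) : pvPassS [x] = [x] := rfl
lemma pvPassS_two (x y : Int) (rest : List Int) :
    pvPassS (x :: y :: rest) = pvG x (if x = -1 ∧ y = 1 then -1 else y) rest := rfl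

lemma pv_getD_at (l1 l2 : List Int) (x : Int) :
    (l1 ++ x :: l2).getD l1.length 0 = x := by
  induction l1 with
  | nil => simp
  | cons a l ih => simpa using ih

lemma pv_set_at (l1 l2 : List Int) (x v : Int) :
    (l1 ++ x :: l2).set l1.length v = l1 ++ v :: l2 := by
  induction l1 with
  | nil => simp
  | cons a l ih => simpa using ih

lemma pv_foldl_range_iter (f : List Int → List Int) :
    ∀ (n : Nat) (b : List Int), (List.range n).foldl (fun a _ => f a) b = f^[n] b := by
  intro n
  induction n with
  | zero => intro b; simp
  | succ n ih =>
      intro b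
      rw [List.range_succ, List.foldl_append, ih, Function.iterate_succ_apply']
      simp

-- pvStepA at the last index
lemma pv_stepA_last (done : List Int) (prev cur : Int) :
    pvStepA (done ++ [prev, cur]) (done.length + 1)
      = done ++ [if cur = -1 ∧ prev = 1 then -1 else prev, cur] := by
  have hget : (done ++ [prev, cur]).getD (done.length + 1) 0 = cur := by
    have := pv_getD_at (done ++ [prev]) [] cur
    simpa using this
  have hget2 : (done ++ [prev, cur]).getD done.length 0 = prev :=
    pv_getD_at done [cur] prev
  have hset : (done ++ [prev, cur]).set done.length (-1) = done ++ [-1, cur] :=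
    pv_set_at done [cur] prev (-1)
  by_cases hcur : cur = -1
  · by_cases hprev : prev = 1
    · simp [pvStepA, hget, hget2, hset, hcur, hprev]
    · simp [pvStepA, hget, hget2, hcur, hprev]
  · simp [pvStepA, hget, hcur]

-- getElem? at an appended position
lemma pv_get?_at (l1 l2 : List Int) (x : Int) : (l1 ++ x :: l2)[l1.length]? = some x := by
  induction l1 with
  | nil => simp
  | cons a l ih => simpa using ih

-- pvStepA at a middle index
lemma pv_stepA_mid (done : List Int) (prev cur x : Int) (rest : List Int) :
    pvStepA (done ++ prev :: cur :: x :: rest) (done.length + 1)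
      = done ++ (if cur = -1 ∧ prev = 1 then -1 else prev)
          :: cur :: (if cur = -1 ∧ x = 1 then -1 else x) :: rest := by
  have hq1 : ∀ p c x' : Int, (done ++ p :: c :: x' :: rest)[done.length + 1]? = some c := by
    intro p c x'
    have h := pv_get?_at (done ++ [p]) (x' :: rest) c
    rw [show (done ++ [p]).length = done.length + 1 by simp,
      show (done ++ [p]) ++ c :: x' :: rest = done ++ p :: c :: x' :: rest by simp] at h
    exact h
  have hq2 : ∀ p c x' : Int, (done ++ p :: c :: x' :: rest)[done.length]? = some p :=
    fun p c x' => pv_get?_at done (c :: x' :: rest) p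
  have hq3 : ∀ p c x' : Int,
      (done ++ p :: c :: x' :: rest)[done.length + 1 + 1]? = some x' := by
    intro p c x'
    have h := pv_get?_at (done ++ [p, c]) rest x'
    rw [show (done ++ [p, c]).length = done.length + 1 + 1 by simp,
      show (done ++ [p, c]) ++ x' :: rest = done ++ p :: c :: x' :: rest by simp] at h
    exact h
  have hset2 : ∀ p c x' v : Int,
      (done ++ p :: c :: x' :: rest).set done.length v = done ++ v :: c :: x' :: rest :=
    fun p c x' v => pv_set_at done (c :: x' :: rest) p v
  have hset3 : ∀ p c x' v : Int,
      (done ++ p :: c :: x' :: rest).set (done.length + 1 + 1) v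
        = done ++ p :: c :: v :: rest := by
    intro p c x' v
    have h := pv_set_at (done ++ [p, c]) rest x' v
    rw [show (done ++ [p, c]).length = done.length + 1 + 1 by simp,
      show (done ++ [p, c]) ++ x' :: rest = done ++ p :: c :: x' :: rest by simp,
      show (done ++ [p, c]) ++ v :: rest = done ++ p :: c :: v :: rest by simp] at h
    exact h
  have hlen2 : ∀ p c x' : Int,
      done.length + 1 + 1 < (done ++ p :: c :: x' :: rest).length := by
    intro p c x'; simp; omega
  have hgetE : ∀ (p c x' : Int) (hb : done.length + 1 + 1 < (done ++ p :: c :: x' :: rest).length),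
      (done ++ p :: c :: x' :: rest)[done.length + 1 + 1]'hb = x' := by
    intro p c x' hb
    have h := hq3 p c x'
    rw [List.getElem?_eq_getElem hb, Option.some_inj] at h
    exact h
  have hlen' : done.length + 1 + 1 < done.length + (rest.length + 1 + 1 + 1) := by omega
  by_cases hcur : cur = -1 <;> by_cases hprev : prev = 1 <;> by_cases hx : x = 1 <;>
    simp [pvStepA, hq1, hq2, hq3, hset2, hset3, hlen2, hgetE, hlen', hcur, hprev, hx]

-- the inner fold from index |done|+1 equals the structural scan pvG
lemma pv_fold_g : ∀ (rest done : List Int) (prev cur : Int),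
    (List.range' (done.length + 1) (rest.length + 1)).foldl pvStepA
        (done ++ prev :: cur :: rest)
      = done ++ pvG prev cur rest := by
  intro rest
  induction rest with
  | nil =>
      intro done prev cur
      simp only [List.length_nil, Nat.zero_add, List.range'_one, List.foldl_cons,
        List.foldl_nil]
      exact pv_stepA_last done prev cur
  | cons x rest' ih =>
      intro done prev cur
      rw [List.length_cons, List.range'_succ, List.foldl_cons,
        pv_stepA_mid done prev cur x rest']
      have h := ih (done ++ [if cur = -1 ∧ prev = 1 then -1 else prev]) cur
        (if cur = -1 ∧ x = 1 then -1 else x)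
      simp only [List.length_append, List.length_cons, List.length_nil,
        Nat.zero_add, List.append_assoc, List.cons_append, List.nil_append] at h
      rw [show done.length + 1 + 1 = done.length + (1 + 1) from by omega] at h
      rw [show done.length + 1 + 1 = done.length + (1 + 1) from by omega]
      rw [h]
      simp [pvG]

lemma pv_pass_eq (b : List Int) : pvPass b = pvPassS b := by
  cases b with
  | nil => rfl
  | cons x b' =>
      cases b' with
      | nil =>
          have h0 : pvStepA [x] 0 = [x] := by
            by_cases hx : x = -1 <;> simp [pvStepA, hx]
          simp [pvPass, pvPassS_one, List.range_one, h0]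
      | cons y rest =>
          have hr : List.range (rest.length + 1 + 1) = 0 :: List.range' 1 (rest.length + 1) := by
            rw [List.range_eq_range', List.range'_succ]
          have h0 : pvStepA (x :: y :: rest) 0
              = x :: (if x = -1 ∧ y = 1 then -1 else y) :: rest := by
            have hget : (x :: y :: rest).getD 0 0 = x := rfl
            have hget1 : ∀ a : Int, (a :: y :: rest).getD 1 0 = y := fun _ => rfl
            by_cases hx : x = -1
            · by_cases hy : y = 1
              · simp [pvStepA, hx, hy, List.set]
              · simp [pvStepA, hx, hy]
            · simp [pvStepA, hx]
          have h := pv_fold_g rest [] x (if x = -1 ∧ y = 1 then -1 else y)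
          simp only [List.length_nil, Nat.zero_add, List.nil_append] at h
          simp only [pvPass, List.length_cons, hr, List.foldl_cons, h0, h, pvPassS_two]

lemma pv_pass_funext : pvPass = pvPassS := funext pv_pass_eq

-- fire spreads right through a flammable tail
lemma pvG_chain : ∀ (t : List Int), (∀ x ∈ t, x = 1 ∨ x = -1) → ∀ p : Int,
    pvG p (-1) t = (if p = 1 then -1 else p) :: List.replicate (t.length + 1) (-1) := by
  intro t
  induction t with
  | nil => intro h p; simp [pvG, List.replicate]
  | cons x t ih =>
      intro h p
      have ih' := ih (fun y hy => h y (List.mem_cons_of_mem _ hy)) (-1)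
      rcases h x List.mem_cons_self with h1 | h1 <;> subst h1 <;>
        simp [pvG, ih', List.replicate_succ]

lemma pvG_ones : ∀ (t : List Int), (∀ x ∈ t, x = (1:Int)) → ∀ p : Int,
    pvG p 1 t = p :: 1 :: t := by
  intro t
  induction t with
  | nil => intro h p; simp [pvG]
  | cons x t ih =>
      intro h p
      have hx : x = (1:Int) := h x List.mem_cons_self
      have ih' := ih (fun y hy => h y (List.mem_cons_of_mem _ hy)) 1
      subst hx
      simp only [pvG]
      simp [ih']

lemma pvG_pref : ∀ (j : Nat) (t : List Int), (∀ x ∈ t, x = 1 ∨ x = -1) → ∀ p : Int,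
    pvG p 1 (List.replicate j 1 ++ -1 :: t)
      = p :: (List.replicate j 1 ++ -1 :: List.replicate (t.length + 1) (-1)) := by
  intro j
  induction j with
  | zero =>
      intro t ht p
      simp only [List.replicate, List.nil_append, pvG]
      have hc := pvG_chain t ht 1
      simp only [show ((1:Int) = -1 ∧ (-1:Int) = 1) = False by simp] at *
      simp [hc, List.replicate_succ]
  | succ j ih =>
      intro t ht p
      rw [List.replicate_succ, List.cons_append]
      simp [pvG, ih t ht, List.replicate_succ]

-- a non-flammable cell blocks the scan (three boundary shapes)
lemma pvG_barrier_cur (c : Int) (hc1 : c ≠ 1) (hc2 : c ≠ -1) :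
    ∀ (v : List Int) (y : Int), pvG c y v = c :: pvPassS (y :: v) := by
  intro v y
  cases v with
  | nil => simp [pvG, pvPassS_one, hc1]
  | cons z w => simp [pvG, pvPassS_two, hc1]

lemma pvG_barrier_prev (c : Int) (hc1 : c ≠ 1) (hc2 : c ≠ -1) :
    ∀ (v : List Int) (p : Int), pvG p c v = p :: c :: pvPassS v := by
  intro v p
  cases v with
  | nil => simp [pvG, pvPassS_nil, hc2]
  | cons y v' =>
      have h1 : (if c = -1 ∧ p = 1 then (-1:Int) else p) = p := by simp [hc2]
      have h2 : (if c = -1 ∧ y = 1 then (-1:Int) else y) = y := by simp [hc2]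
      simp only [pvG, h1, h2]
      rw [pvG_barrier_cur c hc1 hc2 v' y]

lemma pvG_barrier (c : Int) (hc1 : c ≠ 1) (hc2 : c ≠ -1) :
    ∀ (s : List Int) (prev cur : Int) (v : List Int),
      pvG prev cur (s ++ c :: v) = pvG prev cur s ++ c :: pvPassS v := by
  intro s
  induction s with
  | nil =>
      intro prev cur v
      have h2 : (if cur = -1 ∧ c = 1 then (-1:Int) else c) = c := by simp [hc1]
      simp only [List.nil_append, pvG, h2]
      rw [pvG_barrier_prev c hc1 hc2 v cur]
      simp [pvG]
  | cons x s' ih =>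
      intro prev cur v
      simp only [List.cons_append, pvG]
      rw [ih cur (if cur = -1 ∧ x = 1 then -1 else x) v]

lemma pvPassS_decomp (c : Int) (hc1 : c ≠ 1) (hc2 : c ≠ -1) (r v : List Int) :
    pvPassS (r ++ c :: v) = pvPassS r ++ c :: pvPassS v := by
  cases r with
  | nil =>
      cases v with
      | nil => simp [pvPassS_one, pvPassS_nil]
      | cons y v' =>
          have h2 : (if c = -1 ∧ y = 1 then (-1:Int) else y) = y := by simp [hc2]
          simp only [List.nil_append, pvPassS_nil, pvPassS_two, h2]
          rw [pvG_barrier_cur c hc1 hc2 v' y]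
  | cons x r' =>
      cases r' with
      | nil =>
          have h2 : (if x = -1 ∧ c = 1 then (-1:Int) else c) = c := by simp [hc1]
          simp only [List.cons_append, List.nil_append, pvPassS_one, pvPassS_two, h2]
          rw [pvG_barrier_prev c hc1 hc2 v x]
      | cons y r'' =>
          simp only [List.cons_append, pvPassS_two]
          exact pvG_barrier c hc1 hc2 r'' x (if x = -1 ∧ y = 1 then -1 else y) v

lemma pvPassS_all1 (r : List Int) (h : ∀ x ∈ r, x = (1:Int)) : pvPassS r = r := by
  cases r with
  | nil => rfl
  | cons x r' =>
      cases r' with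
      | nil => rfl
      | cons y r'' =>
          have hx : x = (1:Int) := h x List.mem_cons_self
          have hy : y = (1:Int) := h y (List.mem_cons_of_mem _ List.mem_cons_self)
          subst hx; subst hy
          rw [pvPassS_two]
          have := pvG_ones r'' (fun z hz => h z (by simp [hz])) 1
          simpa using this

lemma pvPassS_fire0 (t : List Int) (h : ∀ x ∈ t, x = 1 ∨ x = -1) :
    pvPassS (-1 :: t) = List.replicate (t.length + 1) (-1) := by
  cases t with
  | nil => rfl
  | cons x t' =>
      have ht' := fun y hy => h y (List.mem_cons_of_mem _ hy)
      have hc := pvG_chain t' ht' (-1)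
      rcases h x List.mem_cons_self with h1 | h1 <;> subst h1 <;>
        simp [pvPassS_two, hc, List.replicate_succ]

lemma pvPassS_fireS (a : Nat) (t : List Int) (h : ∀ x ∈ t, x = 1 ∨ x = -1) :
    pvPassS (List.replicate (a + 1) 1 ++ -1 :: t)
      = List.replicate a 1 ++ -1 :: List.replicate (t.length + 1) (-1) := by
  cases a with
  | zero =>
      simp only [List.replicate, List.cons_append, List.nil_append, pvPassS_two]
      have hc := pvG_chain t h 1
      simp [hc, List.replicate_succ]
  | succ j =>
      rw [List.replicate_succ, List.replicate_succ, List.cons_append, List.cons_append,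
        pvPassS_two]
      have hp := pvG_pref j t h 1
      simp [hp, List.replicate_succ]

lemma pv_fix1 (m : Nat) : pvPassS (List.replicate m (-1)) = List.replicate m (-1) := by
  cases m with
  | zero => rfl
  | succ m' =>
      rw [List.replicate_succ,
        pvPassS_fire0 (List.replicate m' (-1))
          (fun x hx => Or.inr (List.eq_of_mem_replicate hx))]
      simp [List.replicate_succ]

lemma pv_iter_fix (k m : Nat) : pvPassS^[k] (List.replicate m (-1)) = List.replicate m (-1) := by
  induction k with
  | zero => simp
  | succ k ih => rw [Function.iterate_succ_apply, pv_fix1]; exact ih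

lemma pv_iter_fire : ∀ (a : Nat) (k : Nat) (t : List Int), (∀ x ∈ t, x = 1 ∨ x = -1) →
    a + 1 ≤ k →
    pvPassS^[k] (List.replicate a 1 ++ -1 :: t) = List.replicate (a + 1 + t.length) (-1) := by
  intro a
  induction a with
  | zero =>
      intro k t ht hk
      obtain ⟨k', rfl⟩ : ∃ k', k = k' + 1 := ⟨k - 1, by omega⟩
      rw [Function.iterate_succ_apply]
      simp only [List.replicate, List.nil_append]
      rw [pvPassS_fire0 t ht, pv_iter_fix]
      congr 1
      omega
  | succ a ih =>
      intro k t ht hk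
      obtain ⟨k', rfl⟩ : ∃ k', k = k' + 1 := ⟨k - 1, by omega⟩
      rw [Function.iterate_succ_apply, pvPassS_fireS a t ht]
      have h2 := ih k' (List.replicate (t.length + 1) (-1))
        (fun x hx => Or.inr (List.eq_of_mem_replicate hx)) (by omega)
      rw [h2]
      simp only [List.length_replicate]
      congr 1
      omega

lemma pv_iter_all1 (k : Nat) (r : List Int) (h : ∀ x ∈ r, x = (1:Int)) :
    pvPassS^[k] r = r := by
  induction k with
  | zero => simp
  | succ k ih => rw [Function.iterate_succ_apply, pvPassS_all1 r h]; exact ih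

lemma pv_iter_decomp (c : Int) (hc1 : c ≠ 1) (hc2 : c ≠ -1) :
    ∀ (k : Nat) (r v : List Int),
      pvPassS^[k] (r ++ c :: v) = pvPassS^[k] r ++ c :: pvPassS^[k] v := by
  intro k
  induction k with
  | zero => intro r v; simp
  | succ k ih =>
      intro r v
      rw [Function.iterate_succ_apply, pvPassS_decomp c hc1 hc2,
        ih (pvPassS r) (pvPassS v), Function.iterate_succ_apply,
        Function.iterate_succ_apply]

lemma pv_split_barrier : ∀ (b : List Int),
    (∀ x ∈ b, x = 1 ∨ x = -1) ∨
      ∃ r c v, b = r ++ c :: v ∧ (∀ x ∈ r, x = 1 ∨ x = -1) ∧ c ≠ 1 ∧ c ≠ -1 := by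
  intro b
  induction b with
  | nil => left; simp
  | cons x b' ih =>
      by_cases hx : x = 1 ∨ x = -1
      · rcases ih with hf | ⟨r, c, v, rfl, hr, hc1, hc2⟩
        · left
          intro y hy
          rcases List.mem_cons.mp hy with rfl | hy
          · exact hx
          · exact hf y hy
        · right
          refine ⟨x :: r, c, v, rfl, ?_, hc1, hc2⟩
          intro y hy
          rcases List.mem_cons.mp hy with rfl | hy
          · exact hx
          · exact hr y hy
      · right
        push_neg at hx
        exact ⟨[], x, b', rfl, by simp, hx.1, hx.2⟩

lemma pv_split_fire : ∀ (r : List Int), (∀ x ∈ r, x = 1 ∨ x = -1) → (-1 : Int) ∈ r →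
    ∃ a t, r = List.replicate a 1 ++ -1 :: t ∧ (∀ x ∈ t, x = 1 ∨ x = -1) := by
  intro r
  induction r with
  | nil => intro _ h; simp at h
  | cons x r' ih =>
      intro hf hm
      rcases hf x List.mem_cons_self with rfl | rfl
      · have hm' : (-1 : Int) ∈ r' := by
          rcases List.mem_cons.mp hm with h | h
          · norm_num at h
          · exact h
        obtain ⟨a, t, heq, htf⟩ := ih (fun y hy => hf y (List.mem_cons_of_mem _ hy)) hm'
        refine ⟨a + 1, t, ?_, htf⟩
        rw [heq, List.replicate_succ, List.cons_append]
      · exact ⟨0, r', by simp, fun y hy => hf y (List.mem_cons_of_mem _ hy)⟩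

-- B-side: running the fold through a flammable block accumulates it into run
lemma pvB_run : ∀ (l : List Int), (∀ x ∈ l, x = 1 ∨ x = -1) →
    ∀ (m : List Int) (out run : List Int) (burn : Bool),
      (l ++ m).foldl pvStepB (out, run, burn)
        = m.foldl pvStepB (out, run ++ l, burn || decide ((-1 : Int) ∈ l)) := by
  intro l
  induction l with
  | nil => intro _ m out run burn; simp
  | cons x l' ih =>
      intro hf m out run burn
      have hstep : pvStepB (out, run, burn) x
          = (out, run ++ [x], if x = -1 then true else burn) := by
        simp [pvStepB, hf x List.mem_cons_self]
      rw [List.cons_append, List.foldl_cons, hstep,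
        ih (fun y hy => hf y (List.mem_cons_of_mem _ hy)) m out (run ++ [x]) _]
      by_cases hx : x = -1
      · simp [hx]
      · have hx' : ¬ (-1 : Int) = x := fun h => hx h.symm
        simp [hx, hx']

lemma pvB_out : ∀ (v : List Int) (out run : List Int) (burn : Bool),
    v.foldl pvStepB (out, run, burn)
      = (out ++ (v.foldl pvStepB ([], run, burn)).1, (v.foldl pvStepB ([], run, burn)).2) := by
  intro v
  induction v with
  | nil => intro out run burn; simp
  | cons x v' ih =>
      intro out run burn
      by_cases hx : x = 1 ∨ x = -1
      · simp only [List.foldl_cons, pvStepB, if_pos hx]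
        exact ih out (run ++ [x]) _
      · simp only [List.foldl_cons, pvStepB, if_neg hx]
        rw [ih (out ++ pvFlush run burn ++ [x]) [] false,
          ih ([] ++ pvFlush run burn ++ [x]) [] false]
        simp [List.append_assoc]

lemma pvAlt_run (r : List Int) (h : ∀ x ∈ r, x = 1 ∨ x = -1) :
    propagacion_alt r = if (-1 : Int) ∈ r then List.replicate r.length (-1) else r := by
  have h1 : r.foldl pvStepB ([], [], false)
      = ([], r, decide ((-1 : Int) ∈ r)) := by
    have := pvB_run r h [] [] [] false
    simpa using this
  by_cases hm : (-1 : Int) ∈ r <;> simp [propagacion_alt, h1, pvFlush, hm]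

lemma pvAlt_decomp (r : List Int) (c : Int) (v : List Int)
    (h : ∀ x ∈ r, x = 1 ∨ x = -1) (hc1 : c ≠ 1) (hc2 : c ≠ -1) :
    propagacion_alt (r ++ c :: v)
      = pvFlush r (decide ((-1 : Int) ∈ r)) ++ c :: propagacion_alt v := by
  have hb := pvB_run r h (c :: v) [] [] false
  have hc : ¬ (c = 1 ∨ c = -1) := by
    intro hor; rcases hor with h1 | h1
    · exact hc1 h1
    · exact hc2 h1
  have hstep : pvStepB ([], r, decide ((-1 : Int) ∈ r)) c
      = ([] ++ pvFlush r (decide ((-1 : Int) ∈ r)) ++ [c], [], false) := by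
    simp [pvStepB, hc]
  have hout := pvB_out v ([] ++ pvFlush r (decide ((-1 : Int) ∈ r)) ++ [c]) [] false
  simp only [propagacion_alt]
  rw [hb]
  simp only [List.nil_append, Bool.false_or, List.foldl_cons]
  rw [show pvStepB ([], r, decide ((-1 : Int) ∈ r)) c
      = (pvFlush r (decide ((-1 : Int) ∈ r)) ++ [c], [], false) by simpa using hstep]
  rw [pvB_out v (pvFlush r (decide ((-1 : Int) ∈ r)) ++ [c]) [] false]
  simp [List.append_assoc]

lemma pv_main : ∀ (n : Nat) (b : List Int) (k : Nat), b.length = n → n ≤ k →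
    pvPassS^[k] b = propagacion_alt b := by
  intro n
  induction n using Nat.strong_induction_on with
  | _ n ih =>
      intro b k hlen hk
      rcases pv_split_barrier b with hf | ⟨r, c, v, rfl, hr, hc1, hc2⟩
      · by_cases hm : (-1 : Int) ∈ b
        · obtain ⟨a, t, rfl, htf⟩ := pv_split_fire b hf hm
          have hL : (List.replicate a 1 ++ -1 :: t).length = a + 1 + t.length := by
            simp; omega
          rw [pv_iter_fire a k t htf (by omega), pvAlt_run _ hf, if_pos hm, hL]
        · have h1 : ∀ x ∈ b, x = (1 : Int) := by
            intro x hx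
            rcases hf x hx with h | h
            · exact h
            · exact absurd (h ▸ hx) hm
          rw [pv_iter_all1 k b h1, pvAlt_run b hf, if_neg hm]
      · have hlen2 : r.length + 1 + v.length = n := by
          simp at hlen; omega
        rw [pv_iter_decomp c hc1 hc2 k r v]
        have hv : pvPassS^[k] v = propagacion_alt v :=
          ih v.length (by omega) v k rfl (by omega)
        have hrpart : pvPassS^[k] r = pvFlush r (decide ((-1 : Int) ∈ r)) := by
          by_cases hm : (-1 : Int) ∈ r
          · obtain ⟨a, t, rfl, htf⟩ := pv_split_fire r hr hm
            have hL : (List.replicate a 1 ++ -1 :: t).length = a + 1 + t.length := by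
              simp; omega
            rw [pv_iter_fire a k t htf (by omega)]
            simp only [pvFlush, hm, decide_true, if_true, hL]
          · have h1 : ∀ x ∈ r, x = (1 : Int) := by
              intro x hx
              rcases hr x hx with h | h
              · exact h
              · exact absurd (h ▸ hx) hm
            rw [pv_iter_all1 k r h1]
            simp [pvFlush, hm]
        rw [hv, hrpart, pvAlt_decomp r c v hr hc1 hc2]

-- ===== VERDICT (by name: the statement is the Claim_ definition above) =====
theorem propagacion_spec : Claim_equal_propagacion := by
  intro b _
  show propagacion b = propagacion_alt b
  have h1 : propagacion b = pvPass^[b.length] b :=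
    pv_foldl_range_iter pvPass b.length b
  rw [h1, pv_pass_funext]
  exact pv_main b.length b b.length rfl le_rfl
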